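-- pv_equiv track=rewrite | github.com/oruchkin/biteofpithon | foobar/Bunny Worker Locations/bunny-worker-locations.py | solution
-- ===== SOURCE A (Python) =====
-- def solution(x, y):
--
--     # fining x with y==1 (x,1)
--     x_number = 0
--     for i in range(1, x+1):
--         x_number += i
--
--     # finding id accoridng to y
--     y_number = 0
--     for i in range(1, y):
--         y_number += (x-1) + i
--     y_number += x_number
--
--     return str(y_number)
-- ===== SOURCE B (Python) =====
-- def solution(x, y):
--     # Closed-form: sum(1..x) = x(x+1)//2; sum_{i=1}^{y-1} ((x-1)+i) = (y-1)(x-1) + y(y-1)//2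
--     total = x * (x + 1) // 2 if x > 0 else 0
--     if y > 1:
--         total += (y - 1) * (x - 1) + y * (y - 1) // 2
--     return str(total)
-- ===== Notes on version B (the rewrite author's own statement) =====
-- stated objective: faster
-- what changed: Replaces the two accumulation loops over range(1,x+1) and range(1,y) with closed-form arithmetic-series formulas (Gauss sums), guarded for the empty-range cases.
import Mathlib
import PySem

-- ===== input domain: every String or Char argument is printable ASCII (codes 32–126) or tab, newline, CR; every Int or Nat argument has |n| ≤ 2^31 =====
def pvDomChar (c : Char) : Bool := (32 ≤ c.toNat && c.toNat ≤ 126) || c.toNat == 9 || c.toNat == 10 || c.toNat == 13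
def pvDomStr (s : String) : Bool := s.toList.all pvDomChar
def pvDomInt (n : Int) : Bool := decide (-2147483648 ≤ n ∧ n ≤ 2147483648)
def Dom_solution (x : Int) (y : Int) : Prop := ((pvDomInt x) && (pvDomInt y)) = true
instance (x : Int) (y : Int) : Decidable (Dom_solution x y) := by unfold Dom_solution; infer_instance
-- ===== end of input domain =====

-- B replaces A's two accumulation loops with closed-form arithmetic-series formulas (objective: faster).

-- ===== PORT A =====
def solution (x : Int) (y : Int) : String :=
  let x_number : Int := (PySem.List.pyRange 1 (x + 1) 1).foldl (fun acc i => acc + i) 0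
  let y_number : Int := (PySem.List.pyRange 1 y 1).foldl (fun acc i => acc + ((x - 1) + i)) 0
  let y_number := y_number + x_number
  PySem.Int.toStr y_number

-- ===== PORT B =====
def solution_alt (x : Int) (y : Int) : String :=
  let total : Int := if x > 0 then PySem.Int.floordiv (x * (x + 1)) 2 else 0
  let total : Int :=
    if y > 1 then total + ((y - 1) * (x - 1) + PySem.Int.floordiv (y * (y - 1)) 2) else total
  PySem.Int.toStr total

-- ===== PRECONDITION & SPEC =====
def Spec_solution (x : Int) (y : Int) (out : String) : Prop := out = solution_alt x y
instance (x : Int) (y : Int) (out : String) : Decidable (Spec_solution x y out) := by unfold Spec_solution; infer_instance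

-- ===== CLAIM (what is proved, stated in full; the proofs are below) =====
def Claim_equal_solution : Prop := ∀ (x : Int) (y : Int), Dom_solution x y → Spec_solution x y (solution x y)

-- ===== LEMMAS AND PROOFS =====

-- sum over range(1, 1+n) of (c + i), accumulated from s
theorem pv_sum_shift (c : Int) : ∀ (n : Nat) (s : Int),
    (PySem.List.pyRange 1 (1 + (n : Int)) 1).foldl (fun acc i => acc + (c + i)) s
      = s + (n : Int) * c + ((n : Int) * ((n : Int) + 1)) / 2 := by
  intro n
  induction n with
  | zero => intro s; simp [PySem.List.pyRange_one_eq_nil]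
  | succ m ih =>
    intro s
    have hsplit : PySem.List.pyRange 1 (1 + ((m : Int) + 1)) 1
        = PySem.List.pyRange 1 (1 + (m : Int)) 1 ++ [1 + (m : Int)] := by
      have : (1 : Int) + ((m : Int) + 1) = (1 + (m : Int)) + 1 := by ring
      rw [this, PySem.List.pyRange_one_succ_right (by omega)]
    push_cast
    rw [hsplit, List.foldl_append, ih s]
    have hdiv : (((m : Int) + 1) * (((m : Int) + 1) + 1)) / 2
        = ((m : Int) * ((m : Int) + 1)) / 2 + ((m : Int) + 1) := by
      have h : ((m : Int) + 1) * (((m : Int) + 1) + 1)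
          = (m : Int) * ((m : Int) + 1) + ((m : Int) + 1) * 2 := by ring
      rw [h, Int.add_mul_ediv_right _ _ (by norm_num)]
    simp only [List.foldl]
    rw [hdiv]; ring

theorem pv_sum_simple : ∀ (n : Nat),
    (PySem.List.pyRange 1 (1 + (n : Int)) 1).foldl (fun acc i => acc + i) 0
      = ((n : Int) * ((n : Int) + 1)) / 2 := by
  intro n
  have h := pv_sum_shift 0 n 0
  have hfun : (PySem.List.pyRange 1 (1 + (n : Int)) 1).foldl (fun acc i => acc + i) 0
      = (PySem.List.pyRange 1 (1 + (n : Int)) 1).foldl (fun acc i => acc + (0 + i)) 0 := by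
    simp
  rw [hfun, h]; ring

theorem pv_core (x y : Int) :
    (PySem.List.pyRange 1 y 1).foldl (fun acc i => acc + ((x - 1) + i)) 0
      + (PySem.List.pyRange 1 (x + 1) 1).foldl (fun acc i => acc + i) 0
      = (if y > 1 then
          (if x > 0 then PySem.Int.floordiv (x * (x + 1)) 2 else 0)
            + ((y - 1) * (x - 1) + PySem.Int.floordiv (y * (y - 1)) 2)
         else (if x > 0 then PySem.Int.floordiv (x * (x + 1)) 2 else 0)) := by
  have hx : (PySem.List.pyRange 1 (x + 1) 1).foldl (fun acc i => acc + i) 0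
      = (if x > 0 then PySem.Int.floordiv (x * (x + 1)) 2 else 0) := by
    by_cases hx0 : x > 0
    · have hn : x + 1 = 1 + ((x.toNat : Int)) := by omega
      have hc : ((x.toNat : Int)) = x := by omega
      rw [hn, pv_sum_simple x.toNat, hc, if_pos hx0,
          PySem.Int.floordiv_eq_ediv_of_pos (by norm_num)]
      congr 1; ring
    · rw [if_neg hx0, PySem.List.pyRange_one_eq_nil (by omega)]
      simp
  have hy : (PySem.List.pyRange 1 y 1).foldl (fun acc i => acc + ((x - 1) + i)) 0
      = (if y > 1 then (y - 1) * (x - 1) + PySem.Int.floordiv (y * (y - 1)) 2 else 0) := by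
    by_cases hy0 : y > 1
    · have hn : y = 1 + (((y - 1).toNat : Int)) := by omega
      have hc : (((y - 1).toNat : Int)) = y - 1 := by omega
      rw [if_pos hy0]
      conv_lhs => rw [hn]
      rw [pv_sum_shift (x - 1) (y - 1).toNat 0, hc,
          PySem.Int.floordiv_eq_ediv_of_pos (by norm_num)]
      have h2 : y * (y - 1) = (y - 1) * ((y - 1) + 1) := by ring
      rw [h2]; ring
    · rw [if_neg hy0, PySem.List.pyRange_one_eq_nil (by omega)]
      simp
  rw [hx, hy]
  by_cases hy0 : y > 1 <;> simp [hy0]; ring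

-- ===== VERDICT (by name: the statement is the Claim_ definition above) =====
theorem solution_spec : Claim_equal_solution := by
  intro x y _
  simp only [Spec_solution, solution, solution_alt]
  exact congrArg PySem.Int.toStr (pv_core x y)
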